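-- pv_equiv track=rewrite | github.com/JimWolfie/Toby | Trice Tourney Utitility/pods.py | tournamentTables
-- ===== SOURCE A (Python) =====
-- from itertools import combinations,chain
--
-- def arrangeTables(players, tables, alreadyPaired):
--
--     result        = [[]] * tables # list of foursomes
--     tableNumber   = 0
--     threesomes    = [combinations(range(2,players+1),3)]
--     firstPlayer   = 1     # first player at table (needs 3 opponents)
--     placed        = set() # players sitting at tables so far (in result)
--     while True:
--         opponents = next(threesomes[tableNumber],None)
--         if not opponents:
--             tableNumber -= 1
--             threesomes.pop()
--             if tableNumber < 0: return None
--             placed.difference_update(result[tableNumber])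
--             firstPlayer = result[tableNumber][0]
--             continue
--         foursome    = [firstPlayer] + list(opponents)
--         pairs       = combinations(foursome,2)
--         if not alreadyPaired.isdisjoint(pairs): continue
--         result[tableNumber] = foursome
--         placed.update(foursome)
--         tableNumber += 1
--         if tableNumber == tables: break
--         remainingPlayers = [ p for p in range(1,players+1) if p not in placed ]
--         firstPlayer = remainingPlayers[0]
--         remainingPlayers = [ p for p in remainingPlayers[1:] if (firstPlayer,p) not in alreadyPaired ]
--         threesomes.append(combinations(remainingPlayers,3))
--     return result
--
-- def tournamentTables(players):
--     tables  = players//4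
--     rounds  = []    # list of foursome for each round (one foresome per table)
--     paired  = set()# player-player tuples (lowest payer number first)
--     while True: # len(rounds) < 5
--         roundTables = arrangeTables(players,tables,paired)
--         if not roundTables: break
--         rounds.append(roundTables)
--         for foursome in roundTables:
--             paired.update(combinations(foursome,2))
--     return rounds
-- ===== SOURCE B (Python) =====
-- from itertools import combinations
--
-- def arrangeTables(players, tables, alreadyPaired):
--     # recursive backtracking instead of an explicit iterator stack
--     if tables < 1:
--         return None
--
--     def place(tablesLeft, firstPlayer, candidates, placed):
--         # returns the list of foursomes for the remaining tables, or None
--         for opponents in candidates: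
--             foursome = [firstPlayer] + list(opponents)
--             if alreadyPaired.isdisjoint(combinations(foursome, 2)):
--                 if tablesLeft == 1:
--                     return [foursome]
--                 newPlaced = placed | set(foursome)
--                 remaining = [p for p in range(1, players + 1) if p not in newPlaced]
--                 nxt = remaining[0]
--                 rest = [p for p in remaining[1:] if (nxt, p) not in alreadyPaired]
--                 tail = place(tablesLeft - 1, nxt, combinations(rest, 3), newPlaced)
--                 if tail is not None:
--                     return [foursome] + tail
--         return None
--
--     return place(tables, 1, combinations(range(2, players + 1), 3), set())
--
-- def tournamentTables(players):
--     tables = players // 4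
--     rounds = []
--     paired = set()
--     while True:
--         roundTables = arrangeTables(players, tables, paired)
--         if not roundTables:
--             break
--         rounds.append(roundTables)
--         for foursome in roundTables:
--             paired.update(combinations(foursome, 2))
--     return rounds
-- ===== Notes on version B (the rewrite author's own statement) =====
-- stated objective: alternative
-- what changed: arrangeTables' explicit iterator-stack while-loop (push/pop of combinations iterators, in-place result/placed mutation with difference_update undo) is replaced by recursive backtracking: a helper place(tablesLeft, firstPlayer, candidates, placed) that explores the same candidates in the same order, builds the table list by consing on the way back, and backtracks by plain recursion with immutable per-call placed sets; tournamentTables is unchanged.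
import Mathlib
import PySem

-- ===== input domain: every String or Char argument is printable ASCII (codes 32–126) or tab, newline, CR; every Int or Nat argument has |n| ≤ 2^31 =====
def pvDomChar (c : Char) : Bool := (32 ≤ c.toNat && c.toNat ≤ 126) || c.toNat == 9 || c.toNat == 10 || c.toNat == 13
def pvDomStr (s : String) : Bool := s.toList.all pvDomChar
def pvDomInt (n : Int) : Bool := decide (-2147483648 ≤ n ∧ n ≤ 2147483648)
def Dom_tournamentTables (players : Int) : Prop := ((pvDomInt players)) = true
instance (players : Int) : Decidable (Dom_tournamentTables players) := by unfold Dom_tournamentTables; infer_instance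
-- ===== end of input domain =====

-- B re-implements arrangeTables' explicit iterator-stack DFS as recursive backtracking exploring the
-- same candidates in the same order (objective: alternative decomposition, same search tree).

-- ===== PORT A =====
-- itertools.combinations(l, 2) as a list of pairs (both ports use it for the pair sets)
def pvPairs2 (l : List Int) : List (Int × Int) :=
  match l with
  | [] => []
  | x :: xs => xs.map (fun y => (x, y)) ++ pvPairs2 xs

-- potential of the iterator stack: the while-loop's termination measure
def pvK (players : Int) : Nat := 2 ^ players.toNat + 1

def pvPot (tables : Int) (K : Nat) : List (List (List Int)) → Nat
  | [] => 0
  | t :: r => t.length * K ^ (tables.toNat - r.length) + pvPot tables K r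

-- the three decrease facts of the loop's measure, named so the recursive definition stays small
-- the body of arrangeTables' `while True` loop; the stack holds the remaining (not yet consumed)
-- combinations of each level, head = top; tableNumber is always len(threesomes)-1 = stack.length-1,
-- so it is represented by the stack shape instead of a separate counter.  The fuel argument is a
-- pure totality guard: the caller passes one more than the loop's measure pvPot·(tables+2)+depth,
-- which strictly decreases at every iteration (pvDecPop/pvDecCont/pvDecPush), so 0 is never reached.
def arrangeLoopA (players tables : Int) (paired : PySem.Set (Int × Int)) :
    Nat → (stack : List (List (List Int))) → (result : List (List Int)) →
    (placed : PySem.Set Int) → (firstPlayer : Int) → Option (List (List Int))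
  | 0, _, _, _, _ => none   -- unreachable fuel guard
  | _ + 1, [], _, _, _ => none   -- unreachable: the loop is never entered with an empty stack
  | fuel + 1, [] :: rest, result, placed, _ =>
    -- `opponents` is None: tableNumber -= 1; threesomes.pop(); return None if below 0,
    -- else undo placed and resume the previous level
    match rest with
    | [] => none
    | q :: qs =>
      let f := result.getD ((q :: qs).length - 1) []
      arrangeLoopA players tables paired fuel (q :: qs) result (PySem.Set.diff placed f) (f.headD 0)
  | fuel + 1, (opp :: top) :: rest, result, placed, firstPlayer =>
    let foursome := firstPlayer :: opp
    if !(PySem.Set.isdisjoint paired (pvPairs2 foursome)) then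
      -- `continue`: the candidate was consumed, state unchanged
      arrangeLoopA players tables paired fuel (top :: rest) result placed firstPlayer
    else
      let result' := result.set rest.length foursome
      let placed' := PySem.Set.update placed foursome
      if (rest.length + 1 : Int) = tables then some result'
      else
        let remaining := (PySem.List.pyRange 1 (players + 1) 1).filter
          (fun p => !(PySem.Set.contains placed' p))
        let firstPlayer' := remaining.headD 0   -- remainingPlayers[0]; nonempty at every reachable state
        let remaining' := remaining.tail.filter
          (fun p => !(PySem.Set.contains paired (firstPlayer', p)))
        arrangeLoopA players tables paired fuel
          (PySem.List.combinations remaining' 3 :: top :: rest) result' placed' firstPlayer'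

def arrangeTablesA (players tables : Int) (paired : PySem.Set (Int × Int)) :
    Option (List (List Int)) :=
  -- the guard only makes the loop total: at every call site tables < 1 forces players ≤ 3, where the
  -- first iterator combinations(range(2,players+1),3) is empty and A returns None immediately
  if 1 ≤ tables then
    arrangeLoopA players tables paired
      (pvPot tables (pvK players)
        [PySem.List.combinations (PySem.List.pyRange 2 (players + 1) 1) 3] * (tables.toNat + 2) + 2)
      [PySem.List.combinations (PySem.List.pyRange 2 (players + 1) 1) 3]
      (List.replicate tables.toNat []) PySem.Set.empty 1
  else none

-- tournamentTables' `while True` loop; fuel players.toNat+2 strictly exceeds the possible number of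
-- iterations (each round pairs player 1 with 3 fresh partners, so there are at most (players-1)/3 rounds)
def tournLoopA (players tables : Int) :
    Nat → List (List (List Int)) → PySem.Set (Int × Int) → List (List (List Int))
  | 0, rounds, _ => rounds
  | fuel + 1, rounds, paired =>
    match arrangeTablesA players tables paired with
    | none => rounds
    | some r =>
      if r.isEmpty then rounds
      else tournLoopA players tables fuel (rounds ++ [r])
        (r.foldl (fun pr f => PySem.Set.update pr (pvPairs2 f)) paired)

def tournamentTables (players : Int) : List (List (List Int)) :=
  tournLoopA players (PySem.Int.floordiv players 4) (players.toNat + 2) [] PySem.Set.empty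

-- ===== PORT B =====
-- place(tablesLeft, firstPlayer, candidates, placed): recursive backtracking over the candidate list
def placeB (players : Int) (paired : PySem.Set (Int × Int)) :
    (tablesLeft : Nat) → (firstPlayer : Int) → (candidates : List (List Int)) →
    (placed : PySem.Set Int) → Option (List (List Int))
  | _, _, [], _ => none
  | 0, _, _ :: _, _ => none   -- unreachable totality guard: tablesLeft ≥ 1 at every call
  | n + 1, firstPlayer, opp :: restC, placed =>
    let foursome := firstPlayer :: opp
    if PySem.Set.isdisjoint paired (pvPairs2 foursome) then
      if n = 0 then some [foursome]   -- tablesLeft == 1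
      else
        let placed' := PySem.Set.union placed (PySem.Set.ofList foursome)
        let remaining := (PySem.List.pyRange 1 (players + 1) 1).filter
          (fun p => !(PySem.Set.contains placed' p))
        let nxt := remaining.headD 0   -- remaining[0]; nonempty at every reachable state
        let rest := remaining.tail.filter
          (fun p => !(PySem.Set.contains paired (nxt, p)))
        match placeB players paired n nxt (PySem.List.combinations rest 3) placed' with
        | some tail => some (foursome :: tail)
        | none => placeB players paired (n + 1) firstPlayer restC placed
    else placeB players paired (n + 1) firstPlayer restC placed
  termination_by tablesLeft _ candidates _ => (tablesLeft, candidates.length)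

def arrangeTablesB (players tables : Int) (paired : PySem.Set (Int × Int)) :
    Option (List (List Int)) :=
  if tables < 1 then none
  else placeB players paired tables.toNat 1
    (PySem.List.combinations (PySem.List.pyRange 2 (players + 1) 1) 3) PySem.Set.empty

def tournLoopB (players tables : Int) :
    Nat → List (List (List Int)) → PySem.Set (Int × Int) → List (List (List Int))
  | 0, rounds, _ => rounds
  | fuel + 1, rounds, paired =>
    match arrangeTablesB players tables paired with
    | none => rounds
    | some r =>
      if r.isEmpty then rounds
      else tournLoopB players tables fuel (rounds ++ [r])
        (r.foldl (fun pr f => PySem.Set.update pr (pvPairs2 f)) paired)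

def tournamentTables_alt (players : Int) : List (List (List Int)) :=
  tournLoopB players (PySem.Int.floordiv players 4) (players.toNat + 2) [] PySem.Set.empty

-- ===== PRECONDITION & SPEC =====
def Spec_tournamentTables (players : Int) (out : List (List (List Int))) : Prop := out = tournamentTables_alt players
instance (players : Int) (out : List (List (List Int))) : Decidable (Spec_tournamentTables players out) := by unfold Spec_tournamentTables; infer_instance

-- ===== CLAIM (what is proved, stated in full; the proofs are below) =====
def Claim_equal_tournamentTables : Prop := ∀ (players : Int), Dom_tournamentTables players → Spec_tournamentTables players (tournamentTables players)

-- ===== LEMMAS AND PROOFS =====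

-- size bound on the candidate lists, used by the equivalence proof's fuel bookkeeping
theorem pvCombLenLe (l : List Int) (r : Nat) :
    (PySem.List.combinations l r).length ≤ 2 ^ l.length := by
  induction l generalizing r with
  | nil =>
    cases r with
    | zero => simp [PySem.List.combinations_zero]
    | succ r => simp [PySem.List.combinations_nil_succ]
  | cons x xs ih =>
    cases r with
    | zero => simp [PySem.List.combinations_zero]; exact Nat.one_le_two_pow
    | succ r =>
      rw [PySem.List.combinations_cons_succ]
      have h1 := ih r
      have h2 := ih (r + 1)
      simp only [List.length_append, List.length_map, List.length_cons, pow_succ]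
      omega

theorem pvFilterTailLen (l : List Int) (p q : Int → Bool) :
    (((l.filter p).tail).filter q).length ≤ l.length := by
  have t1 : ((List.filter p l).tail.filter q).length ≤ (List.filter p l).tail.length :=
    List.length_filter_le _ _
  have t2 : (List.filter p l).tail.length ≤ (List.filter p l).length := by
    rw [List.length_tail]; omega
  have t3 : (List.filter p l).length ≤ l.length := List.length_filter_le _ _
  omega

theorem pvDecPop (players tables : Int) (q : List (List Int)) (qs : List (List (List Int))) :
    pvPot tables (pvK players) (q :: qs) * (tables.toNat + 2) + (q :: qs).length
      < pvPot tables (pvK players) ([] :: q :: qs) * (tables.toNat + 2) + ([] :: q :: qs).length := by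
  simp only [pvPot, List.length_nil, List.length_cons, Nat.zero_mul, Nat.zero_add]
  omega

theorem pvDecCont (players tables : Int) (opp : List Int) (top : List (List Int))
    (rest : List (List (List Int))) :
    pvPot tables (pvK players) (top :: rest) * (tables.toNat + 2) + (top :: rest).length
      < pvPot tables (pvK players) ((opp :: top) :: rest) * (tables.toNat + 2)
        + ((opp :: top) :: rest).length := by
  simp only [pvPot, List.length_cons]
  have hK : 1 ≤ pvK players ^ (tables.toNat - rest.length) :=
    Nat.one_le_pow _ _ (by simp only [pvK]; exact Nat.succ_pos _)
  nlinarith [Nat.zero_le (pvPot tables (pvK players) rest)]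

theorem pvDecPush (players tables : Int) (opp : List Int) (top newTop : List (List Int))
    (rest : List (List (List Int))) (hN : newTop.length ≤ 2 ^ players.toNat)
    (hT : rest.length + 2 ≤ tables.toNat) :
    pvPot tables (pvK players) (newTop :: top :: rest) * (tables.toNat + 2)
        + (newTop :: top :: rest).length
      < pvPot tables (pvK players) ((opp :: top) :: rest) * (tables.toNat + 2)
        + ((opp :: top) :: rest).length := by
  simp only [pvPot, List.length_cons]
  have hKpos : 2 ≤ pvK players := by
    simp only [pvK]
    have := Nat.one_le_two_pow (n := players.toNat); omega
  have hN' : newTop.length ≤ pvK players - 1 := by simp only [pvK]; omega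
  have he : tables.toNat - (rest.length + 1) + 1 = tables.toNat - rest.length := by omega
  have hpow : pvK players ^ (tables.toNat - rest.length)
      = pvK players ^ (tables.toNat - (rest.length + 1)) * pvK players := by
    rw [← pow_succ, he]
  have hp1 : 1 ≤ pvK players ^ (tables.toNat - (rest.length + 1)) := Nat.one_le_pow _ _ (by omega)
  rw [hpow]
  set E := pvK players ^ (tables.toNat - (rest.length + 1))
  set L := newTop.length
  set P := pvPot tables (pvK players) rest
  set K := pvK players
  have key : L * E + 1 ≤ E * K := by
    have h4 : (L + 1) * E ≤ K * E := Nat.mul_le_mul_right E (by omega)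
    nlinarith [hp1]
  nlinarith [Nat.zero_le P, Nat.zero_le (top.length * (E * K))]

theorem tournA_eq_B (players : Int) :
  (∀ tables paired, arrangeTablesA players tables paired = arrangeTablesB players tables paired) →
  ∀ fuel tables rounds paired,
    tournLoopA players tables fuel rounds paired = tournLoopB players tables fuel rounds paired := by
  intro h fuel
  induction fuel with
  | zero => intro tables rounds paired; rfl
  | succ n ih =>
    intro tables rounds paired
    simp only [tournLoopA, tournLoopB, h tables paired]
    cases arrangeTablesB players tables paired with
    | none => rfl
    | some r =>
      simp only
      split_ifs with hr
      · rfl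
      · exact ih tables _ _

-- B's place, resumed over A's whole iterator stack: the value A's loop computes from a mid-search state
def pvResumeB (players tables : Int) (paired : PySem.Set (Int × Int)) :
    List (List (List Int)) → List (List Int) → PySem.Set Int → Int → Option (List (List Int))
  | [], _, _, _ => none
  | top :: rest, result, placed, first =>
    match placeB players paired (tables.toNat - rest.length) first top placed with
    | some tail => some (result.take rest.length ++ tail)
    | none =>
      match rest with
      | [] => none
      | q :: qs =>
        pvResumeB players tables paired (q :: qs) result
          (PySem.Set.diff placed (result.getD ((q :: qs).length - 1) []))
          ((result.getD ((q :: qs).length - 1) []).headD 0)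

-- invariant of a reachable level: every pending candidate is disjoint from `placed` and from the first player
def pvFrameOK (placed : PySem.Set Int) (first : Int) (top : List (List Int)) : Prop :=
  ∀ c ∈ top, c.Nodup ∧ first ∉ c ∧ first ∉ placed ∧ ∀ x ∈ c, x ∉ placed

-- invariant of a reachable whole stack (each popped level sees its own restored `placed`/first player)
def pvValid (result : List (List Int)) :
    List (List (List Int)) → PySem.Set Int → Int → Prop
  | [], _, _ => True
  | top :: rest, placed, first =>
    pvFrameOK placed first top ∧
    (match rest with
     | [] => True
     | q :: qs =>
       pvValid result (q :: qs)
         (PySem.Set.diff placed (result.getD ((q :: qs).length - 1) []))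
         ((result.getD ((q :: qs).length - 1) []).headD 0))

theorem placeB_nil (players : Int) (paired : PySem.Set (Int × Int)) (t : Nat) (f : Int)
    (placed : PySem.Set Int) : placeB players paired t f [] placed = none := by
  cases t <;> simp [placeB]

theorem pvUnionOfList (s : PySem.Set Int) (l : List Int) :
    PySem.Set.union s (PySem.Set.ofList l) = PySem.Set.update s l := by
  show PySem.Set.update s (PySem.Set.ofList l) = PySem.Set.update s l
  rw [PySem.Set.update_eq_append_filter, PySem.Set.update_eq_append_filter,
    PySem.Set.ofList_ofList]

theorem pvRestore (placed : PySem.Set Int) (l : List Int) (hnd : l.Nodup)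
    (hf : ∀ x ∈ l, x ∉ placed) :
    PySem.Set.diff (PySem.Set.update placed l) l = placed := by
  rw [PySem.Set.update_eq_append_of_disjoint placed l hnd hf]
  simp only [PySem.Set.diff, List.filter_append]
  have h1 : List.filter (fun x => !PySem.Set.contains l x) placed = placed :=
    List.filter_eq_self.mpr (fun x hx => by
      have hxl : x ∉ l := fun h => hf x h hx
      simp [PySem.Set.contains_eq_listContains, hxl])
  have h2 : List.filter (fun x => !PySem.Set.contains l x) l = [] :=
    List.filter_eq_nil_iff.mpr (fun x hx => by
      simp [PySem.Set.contains_eq_listContains, hx])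
  rw [h1, h2, List.append_nil]

theorem pvTailNodup (l : List Int) (h : l.Nodup) : l.tail.Nodup := by
  cases l with
  | nil => simp
  | cons a t => simp at h ⊢; exact h.2

theorem pvTakeSet (l : List (List Int)) (i : Nat) (a : List Int) (h : i < l.length) :
    (l.set i a).take (i + 1) = l.take i ++ [a] := by
  rw [List.set_eq_take_append_cons_drop, if_pos h, List.take_append]
  rw [List.length_take_of_le (by omega)]
  simp

theorem pvSetFull (l : List (List Int)) (i : Nat) (a : List Int) (h : i + 1 = l.length) :
    l.set i a = l.take i ++ [a] := by
  rw [List.set_eq_take_append_cons_drop, if_pos (by omega)]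
  rw [show i + 1 = l.length from h, List.drop_length]

theorem pvGetDSet (l : List (List Int)) (i : Nat) (a : List Int) (h : i < l.length) :
    (l.set i a).getD i [] = a := by
  rw [List.getD_eq_getElem?_getD, List.getElem?_set_self h]
  rfl

theorem pvValid_set_high (result : List (List Int)) (i : Nat) (g : List Int) :
    ∀ (stack : List (List (List Int))) (placed : PySem.Set Int) (first : Int),
      stack.length ≤ i + 1 →
      (pvValid (result.set i g) stack placed first ↔ pvValid result stack placed first) := by
  intro stack
  induction stack with
  | nil => intro placed first _; exact Iff.rfl
  | cons top rest ih =>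
    intro placed first hlen
    cases rest with
    | nil => exact Iff.rfl
    | cons q qs =>
      simp only [List.length_cons] at hlen
      simp only [pvValid, List.length_cons, Nat.add_sub_cancel]
      have hne : i ≠ qs.length := by omega
      have hget : (result.set i g).getD qs.length [] = result.getD qs.length [] := by
        rw [List.getD_eq_getElem?_getD, List.getD_eq_getElem?_getD, List.getElem?_set_ne hne]
      rw [hget]
      have hih := ih (PySem.Set.diff placed (result.getD qs.length []))
        ((result.getD qs.length []).headD 0) (by simp only [List.length_cons]; omega)
      rw [hih]

-- one-step unfolding of pvResumeB on a cons stack (rfl; used instead of simp to avoid looping unfolds)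
theorem pvResumeB_cons (players tables : Int) (paired : PySem.Set (Int × Int))
    (top : List (List Int)) (rest : List (List (List Int))) (result : List (List Int))
    (placed : PySem.Set Int) (first : Int) :
    pvResumeB players tables paired (top :: rest) result placed first =
      match placeB players paired (tables.toNat - rest.length) first top placed with
      | some tail => some (result.take rest.length ++ tail)
      | none =>
        match rest with
        | [] => none
        | q :: qs =>
          pvResumeB players tables paired (q :: qs) result
            (PySem.Set.diff placed (result.getD ((q :: qs).length - 1) []))
            ((result.getD ((q :: qs).length - 1) []).headD 0) := by
  rw [pvResumeB.eq_def]

theorem pvResume_set_high (players tables : Int) (paired : PySem.Set (Int × Int))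
    (result : List (List Int)) (i : Nat) (g : List Int) :
    ∀ (stack : List (List (List Int))) (placed : PySem.Set Int) (first : Int),
      stack.length ≤ i + 1 →
      pvResumeB players tables paired stack (result.set i g) placed first
        = pvResumeB players tables paired stack result placed first := by
  intro stack
  induction stack with
  | nil => intro placed first _; rfl
  | cons top rest ih =>
    intro placed first hlen
    rw [pvResumeB_cons, pvResumeB_cons]
    simp only [List.length_cons] at hlen
    have htake : (result.set i g).take rest.length = result.take rest.length :=
      List.take_set_of_le (by omega)
    rw [htake]
    cases hpb : placeB players paired (tables.toNat - rest.length) first top placed with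
    | some tail => rfl
    | none =>
      cases rest with
      | nil => rfl
      | cons q qs =>
        simp only [List.length_cons] at hlen
        have hget : (result.set i g).getD ((q :: qs).length - 1) []
            = result.getD ((q :: qs).length - 1) [] := by
          simp only [List.length_cons, Nat.add_sub_cancel]
          rw [List.getD_eq_getElem?_getD, List.getD_eq_getElem?_getD,
            List.getElem?_set_ne (show i ≠ qs.length by omega)]
        show pvResumeB players tables paired (q :: qs) (result.set i g)
            (PySem.Set.diff placed ((result.set i g).getD ((q :: qs).length - 1) []))
            (((result.set i g).getD ((q :: qs).length - 1) []).headD 0)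
          = pvResumeB players tables paired (q :: qs) result
            (PySem.Set.diff placed (result.getD ((q :: qs).length - 1) []))
            ((result.getD ((q :: qs).length - 1) []).headD 0)
        rw [hget]
        exact ih _ _ (by simp only [List.length_cons]; omega)

-- the inner `match rest with …` of pvValid, as its own predicate so that a variable rest can be destructured
def pvValidRest (result : List (List Int)) (rest : List (List (List Int)))
    (placed : PySem.Set Int) (first : Int) : Prop :=
  match rest with
  | [] => True
  | q :: qs =>
    pvValid result (q :: qs)
      (PySem.Set.diff placed (result.getD ((q :: qs).length - 1) []))
      ((result.getD ((q :: qs).length - 1) []).headD 0)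

theorem pvValid_destruct (result : List (List Int)) (top : List (List Int))
    (rest : List (List (List Int))) (placed : PySem.Set Int) (first : Int) :
    pvValid result (top :: rest) placed first ↔
      pvFrameOK placed first top ∧ pvValidRest result rest placed first := by
  cases rest <;> exact Iff.rfl

theorem pvLoopA_eq (players tables : Int) (paired : PySem.Set (Int × Int)) (fuel : Nat)
    (stack : List (List (List Int))) (result : List (List Int)) (placed : PySem.Set Int)
    (firstPlayer : Int) :
    stack.length ≤ tables.toNat →
    pvPot tables (pvK players) stack * (tables.toNat + 2) + stack.length < fuel →
    result.length = tables.toNat → pvValid result stack placed firstPlayer →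
    arrangeLoopA players tables paired fuel stack result placed firstPlayer
      = pvResumeB players tables paired stack result placed firstPlayer := by
  fun_induction arrangeLoopA players tables paired fuel stack result placed firstPlayer
  · -- fuel 0: unreachable, the measure is below the fuel
    intro _ hfuel _ _
    exact absurd hfuel (by omega)
  · -- stack = []
    intro _ _ _ _; rfl
  · -- stack = [[]]: pop below level 0, both return none
    intro _ _ _ _
    rw [pvResumeB_cons, placeB_nil]
  · -- stack = [] :: q :: qs: pop to the previous level
    rename_i fuel firstPlayer result placed q qs f ih
    intro hlen hfuel hres hv
    obtain ⟨-, hv2⟩ := (pvValid_destruct _ _ _ _ _).mp hv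
    have hd := pvDecPop players tables q qs
    rw [ih (by simp only [List.length_cons] at hlen ⊢; omega) (by omega) hres hv2]
    conv_rhs => rw [pvResumeB_cons, placeB_nil]
  · -- conflict: consume the candidate, state unchanged
    rename_i fuel opp top rest result placed firstPlayer foursome hcond ih
    intro hlen hfuel hres hv
    obtain ⟨h1, h2⟩ := (pvValid_destruct _ _ _ _ _).mp hv
    have hv' : pvValid result (top :: rest) placed firstPlayer :=
      (pvValid_destruct _ _ _ _ _).mpr ⟨fun c hc => h1 c (List.mem_cons_of_mem _ hc), h2⟩
    have hd := pvDecCont players tables opp top rest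
    rw [ih (by simp only [List.length_cons] at hlen ⊢; omega) (by omega) hres hv']
    have hdis : PySem.Set.isdisjoint paired (pvPairs2 (firstPlayer :: opp)) = false := by
      simpa using hcond
    obtain ⟨m, hm⟩ : ∃ m, tables.toNat - rest.length = m + 1 :=
      ⟨tables.toNat - rest.length - 1, by simp only [List.length_cons] at hlen; omega⟩
    rw [pvResumeB_cons, pvResumeB_cons, hm]
    simp only [placeB, hdis, Bool.false_eq_true, if_false]
  · -- last table placed: break with the completed result
    rename_i fuel opp top rest result placed firstPlayer foursome hcond result' h2
    intro hlen hfuel hres hv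
    have hdis : PySem.Set.isdisjoint paired (pvPairs2 (firstPlayer :: opp)) = true := by
      simpa using hcond
    have hT : tables.toNat = rest.length + 1 := by omega
    rw [pvResumeB_cons]
    rw [show tables.toNat - rest.length = 0 + 1 from by omega]
    simp only [placeB, hdis, reduceIte]
    show some (result.set rest.length (firstPlayer :: opp))
      = some (result.take rest.length ++ [firstPlayer :: opp])
    rw [pvSetFull result rest.length (firstPlayer :: opp) (by omega)]
  · -- place the foursome and descend to the next table
    rename_i fuel opp top rest result placed firstPlayer foursome hcond result' placed' h2
      remaining firstPlayer' remaining' ih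
    intro hlen hfuel hres hv
    obtain ⟨hfr, hchain⟩ := (pvValid_destruct _ _ _ _ _).mp hv
    have hT2 : rest.length + 2 ≤ tables.toNat := by simp only [List.length_cons] at hlen; omega
    have hdis : PySem.Set.isdisjoint paired (pvPairs2 (firstPlayer :: opp)) = true := by
      simpa using hcond
    have hfo := hfr opp List.mem_cons_self
    have hndf : (firstPlayer :: opp).Nodup := List.nodup_cons.mpr ⟨hfo.2.1, hfo.1⟩
    have hfresh : ∀ x ∈ firstPlayer :: opp, x ∉ placed := by
      intro x hx
      rcases List.mem_cons.mp hx with h | h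
      · exact h ▸ hfo.2.2.1
      · exact hfo.2.2.2 x h
    have hrestore : PySem.Set.diff (PySem.Set.update placed (firstPlayer :: opp))
        (firstPlayer :: opp) = placed := pvRestore placed _ hndf hfresh
    have hgd : result'.getD rest.length [] = firstPlayer :: opp :=
      pvGetDSet result rest.length _ (by omega)
    have hres' : result'.length = tables.toNat := by
      show (result.set rest.length foursome).length = tables.toNat
      rw [List.length_set]; exact hres
    -- the invariant for the new level
    have hndrem : remaining.Nodup :=
      List.Nodup.filter _ (PySem.List.nodup_pyRange_one 1 (players + 1))
    have hnd' : remaining'.Nodup := List.Nodup.filter _ (pvTailNodup _ hndrem)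
    have hframe : pvFrameOK placed' firstPlayer' (PySem.List.combinations remaining' 3) := by
      intro c hc
      have hsub : c.Sublist remaining' := PySem.List.sublist_of_mem_combinations hc
      have hcrem : ∀ x ∈ c, x ∈ remaining := by
        intro x hx
        have h1 : x ∈ remaining' := hsub.subset hx
        have h2' : x ∈ remaining.tail := List.mem_of_mem_filter h1
        exact List.mem_of_mem_tail h2'
      cases hrem : remaining with
      | nil =>
        exfalso
        have hrem' : remaining' = [] := by
          show List.filter _ remaining.tail = []
          rw [hrem]; rfl
        rw [hrem', PySem.List.combinations_nil_succ] at hc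
        simp at hc
      | cons r0 rtl =>
        have hhead : firstPlayer' = r0 := by show remaining.headD 0 = r0; rw [hrem]; rfl
        have hr0 : r0 ∉ rtl := by
          have h3 := hndrem; rw [hrem] at h3; exact (List.nodup_cons.mp h3).1
        have hout : ∀ x ∈ c, x ∉ placed' := by
          intro x hx
          have hmem : x ∈ remaining := hcrem x hx
          have h4 := List.of_mem_filter hmem
          simpa [PySem.Set.contains_iff] using h4
        refine ⟨hsub.nodup hnd', ?_, ?_, hout⟩
        · intro hmemc
          have h5 : firstPlayer' ∈ remaining.tail := List.mem_of_mem_filter (hsub.subset hmemc)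
          rw [hrem, hhead] at h5
          exact hr0 h5
        · have hmem : firstPlayer' ∈ remaining := by rw [hrem, hhead]; exact List.mem_cons_self
          have h6 := List.of_mem_filter hmem
          simpa [PySem.Set.contains_iff] using h6
    have hvtop : pvValid result (top :: rest) placed firstPlayer :=
      (pvValid_destruct _ _ _ _ _).mpr ⟨fun c hc => hfr c (List.mem_cons_of_mem _ hc), hchain⟩
    have hvtop' : pvValid result' (top :: rest) placed firstPlayer :=
      (pvValid_set_high result rest.length foursome (top :: rest) placed firstPlayer
        (by simp only [List.length_cons]; omega)).mpr hvtop
    have hv'' : pvValid result' (PySem.List.combinations remaining' 3 :: top :: rest)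
        placed' firstPlayer' := by
      refine (pvValid_destruct _ _ _ _ _).mpr ⟨hframe, ?_⟩
      show pvValid result' (top :: rest)
        (PySem.Set.diff placed' (result'.getD ((top :: rest).length - 1) []))
        ((result'.getD ((top :: rest).length - 1) []).headD 0)
      simp only [List.length_cons, Nat.add_sub_cancel]
      rw [hgd]
      show pvValid result' (top :: rest)
        (PySem.Set.diff (PySem.Set.update placed (firstPlayer :: opp)) (firstPlayer :: opp))
        ((firstPlayer :: opp).headD 0)
      rw [hrestore]
      exact hvtop'
    have hd := pvDecPush players tables opp top (PySem.List.combinations remaining' 3) rest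
      (le_trans (pvCombLenLe _ 3) (Nat.pow_le_pow_right (by omega)
        (le_trans (pvFilterTailLen (PySem.List.pyRange 1 (players + 1) 1) _ _)
          (by rw [PySem.List.length_pyRange_one]; omega)))) hT2
    rw [ih (by simp only [List.length_cons] at hlen ⊢; omega) (by omega) hres' hv'']
    -- both sides now reduce to the same match on the recursive place call
    obtain ⟨m, hm⟩ : ∃ m, tables.toNat - rest.length = m + 1 :=
      ⟨tables.toNat - rest.length - 1, by omega⟩
    have hm0 : m ≠ 0 := by omega
    rw [pvResumeB_cons, pvResumeB_cons]
    rw [show tables.toNat - (top :: rest).length = m from by simp only [List.length_cons]; omega]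
    rw [hm]
    simp only [placeB, hdis, reduceIte, if_neg hm0, pvUnionOfList, List.length_cons,
      Nat.add_sub_cancel]
    rw [hgd]
    show (match placeB players paired m firstPlayer'
        (PySem.List.combinations remaining' 3) placed' with
      | some tail => some (result'.take (rest.length + 1) ++ tail)
      | none =>
        pvResumeB players tables paired (top :: rest) result'
          (PySem.Set.diff (PySem.Set.update placed (firstPlayer :: opp)) (firstPlayer :: opp))
          ((firstPlayer :: opp).headD 0)) = _
    rw [hrestore]
    cases hchild : placeB players paired m firstPlayer'
        (PySem.List.combinations remaining' 3) placed' with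
    | some tail =>
      simp only []
      have htake : result'.take (rest.length + 1)
          = result.take rest.length ++ [firstPlayer :: opp] :=
        pvTakeSet result rest.length _ (by omega)
      rw [htake]
      simp [List.append_assoc]
    | none =>
      show pvResumeB players tables paired (top :: rest)
        (result.set rest.length (firstPlayer :: opp)) placed firstPlayer = _
      have hset := pvResume_set_high players tables paired result rest.length (firstPlayer :: opp)
        (top :: rest) placed firstPlayer (by simp only [List.length_cons]; omega)
      rw [hset]
      rw [pvResumeB_cons, hm]
      simp only [List.length_cons, Nat.add_sub_cancel]

theorem arrange_eq (players tables : Int) (paired : PySem.Set (Int × Int)) :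
    arrangeTablesA players tables paired = arrangeTablesB players tables paired := by
  unfold arrangeTablesA arrangeTablesB
  by_cases h : 1 ≤ tables
  · rw [if_pos h, if_neg (by omega)]
    have hval : pvValid (List.replicate tables.toNat [])
        [PySem.List.combinations (PySem.List.pyRange 2 (players + 1) 1) 3] PySem.Set.empty 1 := by
      refine ⟨?_, trivial⟩
      intro c hc
      have hsub : c.Sublist (PySem.List.pyRange 2 (players + 1) 1) :=
        PySem.List.sublist_of_mem_combinations hc
      refine ⟨hsub.nodup (PySem.List.nodup_pyRange_one 2 (players + 1)), ?_,
        by simp [PySem.Set.empty], by simp [PySem.Set.empty]⟩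
      intro hmem
      have := PySem.List.mem_pyRange_one.mp (hsub.subset hmem)
      omega
    rw [pvLoopA_eq players tables paired _ _ _ _ _
      (by simp only [List.length_cons, List.length_nil]; omega)
      (by simp only [List.length_cons, List.length_nil]; omega)
      (by simp [List.length_replicate]) hval]
    simp only [pvResumeB, List.length_nil, Nat.sub_zero, List.take_zero, List.nil_append]
    cases placeB players paired tables.toNat 1
      (PySem.List.combinations (PySem.List.pyRange 2 (players + 1) 1) 3) PySem.Set.empty with
    | some tail => rfl
    | none => rfl
  · rw [if_neg h, if_pos (by omega)]

-- ===== VERDICT (by name: the statement is the Claim_ definition above) =====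
theorem tournamentTables_spec : Claim_equal_tournamentTables := by
  intro players _
  unfold Spec_tournamentTables tournamentTables tournamentTables_alt
  exact tournA_eq_B players (fun t p => arrange_eq players t p) _ _ _ _
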